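-- pv_equiv track=rewrite | github.com/paulklemstine/factor | gnfs_engine.py | _poly_mod
-- ===== SOURCE A (Python) =====
-- def _poly_mod(a, mod_poly, p):
--     """Reduce polynomial a mod (mod_poly, p)."""
--     a = list(a)
--     d = len(mod_poly) - 1
--     lc_inv = pow(mod_poly[-1], -1, p)
--     while len(a) >= len(mod_poly):
--         if a[-1] != 0:
--             coeff = (a[-1] * lc_inv) % p
--             offset = len(a) - len(mod_poly)
--             for i in range(len(mod_poly)):
--                 a[offset + i] = (a[offset + i] - coeff * mod_poly[i]) % p
--         a.pop()
--     # Strip trailing zeros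
--     while len(a) > 1 and a[-1] == 0:
--         a.pop()
--     return a
-- ===== SOURCE B (Python) =====
-- def _step(w, mod_poly, lc_inv, p):
--     """One synthetic-division step: cancel the top coefficient of the length-m window."""
--     t = w[-1]
--     if t != 0:
--         coeff = (t * lc_inv) % p
--         w = [(w[i] - coeff * mod_poly[i]) % p for i in range(len(mod_poly))]
--     return w[:-1]
--
-- def _poly_mod(a, mod_poly, p):
--     """Reduce polynomial a mod (mod_poly, p) by a one-pass sliding-window synthetic division."""
--     m = len(mod_poly)
--     lc_inv = pow(mod_poly[-1], -1, p)
--     if len(a) >= m: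
--         w = list(a[len(a) - m:])
--         for c in reversed(a[:len(a) - m]):
--             w = [c] + _step(w, mod_poly, lc_inv, p)
--         res = _step(w, mod_poly, lc_inv, p)
--     else:
--         res = list(a)
--     while len(res) > 1 and res[-1] == 0:
--         res.pop()
--     return res
-- ===== Notes on version B (the rewrite author's own statement) =====
-- stated objective: alternative
-- what changed: Replaces A's repeated in-place mutation of a full working copy (while-loop that rewrites a length-m slice of the copy and pops) by a one-pass sliding-window synthetic division: a length-m window is folded once over the coefficients from highest to lowest, each step cancelling the top coefficient and pulling in the next one.
import Mathlib
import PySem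

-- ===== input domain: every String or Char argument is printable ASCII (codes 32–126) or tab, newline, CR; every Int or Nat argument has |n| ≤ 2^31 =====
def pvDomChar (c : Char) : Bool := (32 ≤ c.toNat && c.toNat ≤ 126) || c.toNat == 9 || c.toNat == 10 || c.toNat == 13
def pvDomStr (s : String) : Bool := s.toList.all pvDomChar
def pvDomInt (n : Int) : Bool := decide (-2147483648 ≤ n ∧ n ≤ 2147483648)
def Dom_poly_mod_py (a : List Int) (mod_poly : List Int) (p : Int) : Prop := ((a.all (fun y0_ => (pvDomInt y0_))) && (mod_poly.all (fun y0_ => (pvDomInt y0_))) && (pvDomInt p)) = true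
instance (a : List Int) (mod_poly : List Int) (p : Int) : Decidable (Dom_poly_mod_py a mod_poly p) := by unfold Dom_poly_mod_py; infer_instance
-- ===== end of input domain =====

-- B re-implements the reduction as a one-pass sliding-window synthetic division (alternative
-- decomposition, same asymptotic cost); equivalence proved on inputs where pow(mod_poly[-1],-1,p)
-- succeeds (Pre_). Neither implementation mutates its arguments.

-- ===== PORT A =====

-- pow(x, -1, p): hand port (PySem.Int.powMod takes only Nat exponents).  Exact whenever Python
-- returns, i.e. p ≠ 0 and gcd(x, p) = 1 (guaranteed by Pre_): the modular inverse reduced into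
-- the canonical residue range of p (Python's `%` convention); Python raises outside Pre_.
def pyPowInvMod (x p : Int) : Int := PySem.Int.mod (Int.gcdA x p) p

-- the inner `for i in range(len(mod_poly)): a[offset+i] = (a[offset+i] - coeff*mod_poly[i]) % p`
def polyModInner (mod_poly : List Int) (p coeff : Int) (offset : Nat) (a : List Int) : List Int :=
  (List.range mod_poly.length).foldl
    (fun acc i =>
      acc.set (offset + i) (PySem.Int.mod (acc.getD (offset + i) 0 - coeff * mod_poly.getD i 0) p))
    a

theorem polyModInner_length (mod_poly : List Int) (p coeff : Int) (offset : Nat) (a : List Int) :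
    (polyModInner mod_poly p coeff offset a).length = a.length := by
  unfold polyModInner
  generalize (List.range mod_poly.length) = l
  induction l generalizing a with
  | nil => rfl
  | cons i l ih => rw [List.foldl_cons, ih]; simp

-- the outer `while len(a) >= len(mod_poly): ... a.pop()`
def polyModLoop (mod_poly : List Int) (p lc_inv : Int) (a : List Int) : List Int :=
  if _h : mod_poly.length ≤ a.length ∧ 0 < a.length then
    polyModLoop mod_poly p lc_inv
      ((if a.getLastD 0 ≠ 0 then
          polyModInner mod_poly p (PySem.Int.mod (a.getLastD 0 * lc_inv) p)
            (a.length - mod_poly.length) a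
        else a).dropLast)
  else a
termination_by a.length
decreasing_by
  simp only [List.length_dropLast]
  split
  · rw [polyModInner_length]; omega
  · omega

-- `while len(a) > 1 and a[-1] == 0: a.pop()` — identical trailing-zero strip in both Pythons
def polyModStrip (a : List Int) : List Int :=
  if h : 1 < a.length ∧ a.getLastD 0 = 0 then polyModStrip a.dropLast else a
termination_by a.length
decreasing_by simp; omega

def poly_mod_py (a : List Int) (mod_poly : List Int) (p : Int) : List Int :=
  let lc_inv := pyPowInvMod (mod_poly.getLastD 0) p   -- mod_poly[-1]; Pre_ gives mod_poly ≠ []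
  polyModStrip (polyModLoop mod_poly p lc_inv a)

-- ===== PORT B =====

-- `_step`: cancel the top coefficient of the length-m window, return w[:-1]
def polyModStep (mod_poly : List Int) (p lc_inv : Int) (w : List Int) : List Int :=
  let t := w.getLastD 0
  let w1 := if t ≠ 0 then
      (List.range mod_poly.length).map
        (fun i => PySem.Int.mod (w.getD i 0 - (PySem.Int.mod (t * lc_inv) p) * mod_poly.getD i 0) p)
    else w
  w1.dropLast

def poly_mod_py_alt (a : List Int) (mod_poly : List Int) (p : Int) : List Int :=
  let m := mod_poly.length
  let lc_inv := pyPowInvMod (mod_poly.getLastD 0) p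
  let res := if m ≤ a.length then
      let w0 := a.drop (a.length - m)                 -- a[len(a)-m:]
      let w := (a.take (a.length - m)).reverse.foldl  -- for c in reversed(a[:len(a)-m])
        (fun w c => c :: polyModStep mod_poly p lc_inv w) w0
      polyModStep mod_poly p lc_inv w
    else a
  polyModStrip res

-- ===== PRECONDITION & SPEC =====
-- Pre_ excludes exactly the inputs where A raises: mod_poly == [] (IndexError on mod_poly[-1])
-- and p == 0 or gcd(mod_poly[-1], p) ≠ 1 (ValueError from pow(mod_poly[-1], -1, p)).
def Pre_poly_mod_py (a : List Int) (mod_poly : List Int) (p : Int) : Prop :=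
  mod_poly ≠ [] ∧ p ≠ 0 ∧ Int.gcd (mod_poly.getLastD 0) p = 1

instance (a : List Int) (mod_poly : List Int) (p : Int) : Decidable (Pre_poly_mod_py a mod_poly p) := by
  unfold Pre_poly_mod_py; infer_instance

def pvWitness_poly_mod_py : List Int × List Int × Int := ([3, 1, 4, 1], [1, 1], 5)

def Spec_poly_mod_py (a : List Int) (mod_poly : List Int) (p : Int) (out : List Int) : Prop :=
  out = poly_mod_py_alt a mod_poly p
instance (a : List Int) (mod_poly : List Int) (p : Int) (out : List Int) : Decidable (Spec_poly_mod_py a mod_poly p out) := by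
  unfold Spec_poly_mod_py; infer_instance

-- ===== CLAIM (what is proved, stated in full; the proofs are below) =====
def Claim_equal_poly_mod_py : Prop := ∀ (a : List Int) (mod_poly : List Int) (p : Int), Dom_poly_mod_py a mod_poly p → Pre_poly_mod_py a mod_poly p → Spec_poly_mod_py a mod_poly p (poly_mod_py a mod_poly p)

-- ===== LEMMAS AND PROOFS =====

theorem foldl_set_window : ∀ (w : List Int) (g : Nat → Int → Int) (pre : List Int),
      (List.range w.length).foldl
        (fun acc i => acc.set (pre.length + i) (g i (acc.getD (pre.length + i) 0))) (pre ++ w)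
      = pre ++ (List.range w.length).map (fun i => g i (w.getD i 0)) := by
  intro w
  induction w with
  | nil => intro g pre; simp
  | cons h t ih =>
    intro g pre
    rw [List.length_cons, List.range_succ_eq_map]
    rw [List.foldl_cons, List.foldl_map, List.map_cons, List.map_map]
    have e1 : (pre ++ h :: t).getD (pre.length + 0) 0 = h := by
      simp [List.getD]
    have e2 : (pre ++ h :: t).set (pre.length + 0) (g 0 h) = (pre ++ [g 0 h]) ++ t := by
      simp
    rw [e1, e2]
    have e3 : ∀ i : Nat, pre.length + (i + 1) = (pre ++ [g 0 h]).length + i := by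
      intro i; simp; omega
    have e4 : (fun (acc : List Int) (i : Nat) =>
        acc.set (pre.length + (i+1)) (g (i+1) (acc.getD (pre.length + (i+1)) 0)))
      = (fun (acc : List Int) (i : Nat) =>
        acc.set ((pre ++ [g 0 h]).length + i) (g (i+1) (acc.getD ((pre ++ [g 0 h]).length + i) 0))) := by
      funext acc i; rw [e3]
    calc (List.range t.length).foldl
          (fun acc i => acc.set (pre.length + (i+1)) (g (i+1) (acc.getD (pre.length + (i+1)) 0)))
          ((pre ++ [g 0 h]) ++ t)
        = (List.range t.length).foldl
          (fun acc i => acc.set ((pre ++ [g 0 h]).length + i) ((fun j => g (j+1)) i (acc.getD ((pre ++ [g 0 h]).length + i) 0)))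
          ((pre ++ [g 0 h]) ++ t) := by rw [e4]
      _ = (pre ++ [g 0 h]) ++ (List.range t.length).map (fun i => (fun j => g (j+1)) i (t.getD i 0)) := ih (fun j => g (j+1)) (pre ++ [g 0 h])
      _ = pre ++ (g 0 h :: (List.range t.length).map (fun i => g (i+1) (t.getD i 0))) := by simp

theorem getLastD_append_of_ne_nil (pre l : List Int) (h : l ≠ []) :
    (pre ++ l).getLastD 0 = l.getLastD 0 := by
  cases hxl : l.getLast? with
  | none => simp [List.getLast?_eq_none_iff] at hxl; exact absurd hxl h
  | some y => simp [List.getLastD_eq_getLast?, List.getLast?_append_of_ne_nil _ h, hxl]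

theorem polyModStep_eq (mod_poly : List Int) (p lc_inv : Int) (w : List Int) :
    polyModStep mod_poly p lc_inv w
      = (if w.getLastD 0 ≠ 0 then
          (List.range mod_poly.length).map
            (fun i => PySem.Int.mod (w.getD i 0 - (PySem.Int.mod (w.getLastD 0 * lc_inv) p) * mod_poly.getD i 0) p)
        else w).dropLast := rfl

theorem step_length (mod_poly : List Int) (p lc_inv : Int) (w : List Int)
    (hw : w.length = mod_poly.length) :
    (polyModStep mod_poly p lc_inv w).length = mod_poly.length - 1 := by
  rw [polyModStep_eq]
  split <;> simp [hw]

theorem loop_unfold_step (mod_poly : List Int) (p lc_inv : Int) (pre w : List Int)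
    (hm : mod_poly ≠ []) (hw : w.length = mod_poly.length) :
    polyModLoop mod_poly p lc_inv (pre ++ w)
      = polyModLoop mod_poly p lc_inv (pre ++ polyModStep mod_poly p lc_inv w) := by
  have hm1 : 0 < mod_poly.length := List.length_pos_iff.mpr hm
  have hwne : w ≠ [] := by intro hh; rw [hh] at hw; simp at hw; omega
  have hcond : mod_poly.length ≤ (pre ++ w).length ∧ 0 < (pre ++ w).length := by
    simp [hw]; omega
  rw [polyModLoop, dif_pos hcond]
  congr 1
  rw [getLastD_append_of_ne_nil _ _ hwne, polyModStep_eq]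
  have hofs : (pre ++ w).length - mod_poly.length = pre.length := by simp [hw]
  rw [hofs]
  by_cases hz : w.getLastD 0 ≠ 0
  · rw [if_pos hz, if_pos hz]
    have key : polyModInner mod_poly p (PySem.Int.mod (w.getLastD 0 * lc_inv) p) pre.length (pre ++ w)
        = pre ++ (List.range mod_poly.length).map
            (fun i => PySem.Int.mod (w.getD i 0 - (PySem.Int.mod (w.getLastD 0 * lc_inv) p) * mod_poly.getD i 0) p) := by
      unfold polyModInner
      rw [← hw]
      exact foldl_set_window w
        (fun i v => PySem.Int.mod (v - PySem.Int.mod (w.getLastD 0 * lc_inv) p * mod_poly.getD i 0) p) pre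
    rw [key, List.dropLast_append_of_ne_nil (by simp; omega)]
  · rw [if_neg hz, if_neg hz]
    exact List.dropLast_append_of_ne_nil hwne

theorem loop_eq_fold (mod_poly : List Int) (p lc_inv : Int) (hm : mod_poly ≠ []) :
    ∀ (pre w : List Int), w.length = mod_poly.length →
      polyModLoop mod_poly p lc_inv (pre ++ w)
        = polyModStep mod_poly p lc_inv
            (pre.reverse.foldl (fun w c => c :: polyModStep mod_poly p lc_inv w) w) := by
  have hm1 : 0 < mod_poly.length := List.length_pos_iff.mpr hm
  intro pre
  induction pre using List.reverseRecOn with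
  | nil =>
    intro w hw
    rw [List.nil_append]
    have h := loop_unfold_step mod_poly p lc_inv [] w hm hw
    simp only [List.nil_append] at h
    rw [h, polyModLoop, dif_neg]
    · simp
    · intro hc
      rw [step_length mod_poly p lc_inv w hw] at hc
      omega
  | append_singleton init c ih =>
    intro w hw
    rw [show init ++ [c] ++ w = (init ++ [c]) ++ w from rfl]
    rw [loop_unfold_step mod_poly p lc_inv (init ++ [c]) w hm hw]
    rw [show (init ++ [c]) ++ polyModStep mod_poly p lc_inv w
        = init ++ (c :: polyModStep mod_poly p lc_inv w) by simp]
    rw [ih (c :: polyModStep mod_poly p lc_inv w)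
        (by simp [step_length mod_poly p lc_inv w hw]; omega)]
    simp

-- ===== VERDICT (by name: the statement is the Claim_ definition above) =====
theorem poly_mod_py_spec : Claim_equal_poly_mod_py := by
  intro a mod_poly p _hdom hpre
  obtain ⟨hm, -, -⟩ := hpre
  have hm1 : 0 < mod_poly.length := List.length_pos_iff.mpr hm
  unfold Spec_poly_mod_py poly_mod_py poly_mod_py_alt
  dsimp only
  by_cases hlen : mod_poly.length ≤ a.length
  · rw [if_pos hlen]
    congr 1
    have hwlen : (a.drop (a.length - mod_poly.length)).length = mod_poly.length := by
      simp; omega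
    have hl := loop_eq_fold mod_poly p (pyPowInvMod (mod_poly.getLastD 0) p) hm
      (a.take (a.length - mod_poly.length)) (a.drop (a.length - mod_poly.length)) hwlen
    rw [List.take_append_drop] at hl
    exact hl
  · rw [if_neg hlen]
    congr 1
    rw [polyModLoop, dif_neg]
    intro hc
    exact hlen hc.1
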